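-- pv_equiv track=rewrite | github.com/vietnhprintway/vgflow | scripts/backfill-goal-traceability.py | match_api_contracts_by_topic
-- ===== SOURCE A (Python) =====
-- def match_api_contracts_by_topic(title: str, all_endpoints: set[str]) -> list[str]:
--     """Cross-reference title topic against API-CONTRACTS endpoint list.
--
--     Falls back when extract_api_contracts_from_fields finds nothing in trigger.
--     """
--     title_lower = title.lower()
--     matched: list[str] = []
--     # Topic-to-URL substring match
--     topics_to_paths = [
--         ("topup", "/topup"),
--         ("withdraw", "/withdraw"),
--         ("transfer", "/transfer"),
--         ("linked", "/linked-account"),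
--         ("bank account", "/bank-account"),
--         ("fx rate", "/fx"),
--         ("currency", "/preferences"),
--         ("fraud", "/fraud"),
--         ("chargeback", "/chargeback"),
--         ("cooling period", "/cooling-period"),
--         ("merchant", "/merchants"),
--         ("admin", "/admin"),
--         ("webhook", "/webhooks"),
--     ]
--     for topic, substring in topics_to_paths:
--         if topic in title_lower:
--             for ep in all_endpoints:
--                 if substring in ep:
--                     matched.append(ep)
--     return sorted(set(matched))[:5]  # Cap at 5 to avoid bloat
-- ===== SOURCE B (Python) =====
-- TOPICS_TO_PATHS = [
--     ("topup", "/topup"),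
--     ("withdraw", "/withdraw"),
--     ("transfer", "/transfer"),
--     ("linked", "/linked-account"),
--     ("bank account", "/bank-account"),
--     ("fx rate", "/fx"),
--     ("currency", "/preferences"),
--     ("fraud", "/fraud"),
--     ("chargeback", "/chargeback"),
--     ("cooling period", "/cooling-period"),
--     ("merchant", "/merchants"),
--     ("admin", "/admin"),
--     ("webhook", "/webhooks"),
-- ]
--
-- def match_api_contracts_by_topic(title: str, all_endpoints: set[str]) -> list[str]:
--     """Sort the deduplicated endpoints FIRST, then scan them in order and stop
--     as soon as 5 matches are found (A instead collects all matches per topic,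
--     with duplicates, and sorts/dedupes/truncates afterwards)."""
--     title_lower = title.lower()
--     active = [sub for topic, sub in TOPICS_TO_PATHS if topic in title_lower]
--     out = []
--     for ep in sorted(set(all_endpoints)):
--         if any(sub in ep for sub in active):
--             out.append(ep)
--             if len(out) == 5:
--                 break
--     return out
-- ===== Notes on version B (the rewrite author's own statement) =====
-- stated objective: alternative
-- what changed: A collects matching endpoints per topic (with duplicates) and then normalises with sorted(set(...))[:5]; B inverts the pipeline: it sorts the deduplicated endpoint set first, then makes one ordered scan against the precomputed active substrings with early termination after 5 matches, so it never builds a duplicate-laden match list and never sorts matches.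
import Mathlib
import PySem

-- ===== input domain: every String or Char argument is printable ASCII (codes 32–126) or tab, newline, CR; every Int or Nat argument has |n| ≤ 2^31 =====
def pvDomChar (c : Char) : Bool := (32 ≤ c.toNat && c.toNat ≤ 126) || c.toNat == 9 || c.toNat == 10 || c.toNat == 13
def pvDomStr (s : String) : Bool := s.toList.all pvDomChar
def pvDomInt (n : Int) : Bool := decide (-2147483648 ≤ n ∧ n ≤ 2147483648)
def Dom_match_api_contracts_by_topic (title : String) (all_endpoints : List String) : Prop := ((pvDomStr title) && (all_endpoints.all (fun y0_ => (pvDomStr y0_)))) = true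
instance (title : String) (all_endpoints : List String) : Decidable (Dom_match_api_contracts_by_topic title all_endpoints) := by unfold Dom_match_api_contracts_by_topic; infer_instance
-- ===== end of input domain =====

-- B inverts A's pipeline: instead of collecting matches per topic (with duplicates) and then
-- sorting/deduping/truncating, B sorts the deduplicated endpoints first and scans them once in
-- order, stopping as soon as 5 matches are found; return values are proved equal on all inputs.

-- the topic-to-URL-substring table (same data in both Pythons)
def pvTopicsTable : List (String × String) := [
  ("topup", "/topup"),
  ("withdraw", "/withdraw"),
  ("transfer", "/transfer"),
  ("linked", "/linked-account"),
  ("bank account", "/bank-account"),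
  ("fx rate", "/fx"),
  ("currency", "/preferences"),
  ("fraud", "/fraud"),
  ("chargeback", "/chargeback"),
  ("cooling period", "/cooling-period"),
  ("merchant", "/merchants"),
  ("admin", "/admin"),
  ("webhook", "/webhooks")]

-- ===== PORT A =====
def match_api_contracts_by_topic (title : String) (all_endpoints : List String) : List String :=
  let title_lower := PySem.Str.lower title
  let matched : List String :=
    pvTopicsTable.foldl (fun matched ts =>
      if PySem.Str.isIn ts.1 title_lower then
        all_endpoints.foldl (fun matched ep =>
          if PySem.Str.isIn ts.2 ep then matched ++ [ep] else matched) matched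
      else matched) []
  (PySem.List.sorted (PySem.Set.ofList matched) (fun x => x) false).take 5

-- ===== PORT B =====
-- Source B's for-loop over sorted(set(all_endpoints)) with append and break at 5 matches
def pvCollect (active : List String) : List String → List String → List String
  | [], out => out
  | ep :: rest, out =>
    if active.any (fun sub => PySem.Str.isIn sub ep) then
      if (out ++ [ep]).length == 5 then out ++ [ep]
      else pvCollect active rest (out ++ [ep])
    else pvCollect active rest out

def match_api_contracts_by_topic_alt (title : String) (all_endpoints : List String) : List String :=
  let title_lower := PySem.Str.lower title
  let active := (pvTopicsTable.filter (fun ts => PySem.Str.isIn ts.1 title_lower)).map Prod.snd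
  pvCollect active (PySem.List.sorted (PySem.Set.ofList all_endpoints) (fun x => x) false) []

-- ===== PRECONDITION & SPEC =====
def Spec_match_api_contracts_by_topic (title : String) (all_endpoints : List String) (out : List String) : Prop := out = match_api_contracts_by_topic_alt title all_endpoints
instance (title : String) (all_endpoints : List String) (out : List String) : Decidable (Spec_match_api_contracts_by_topic title all_endpoints out) := by unfold Spec_match_api_contracts_by_topic; infer_instance

-- ===== CLAIM =====
def Claim_equal_match_api_contracts_by_topic : Prop := ∀ (title : String) (all_endpoints : List String), Dom_match_api_contracts_by_topic title all_endpoints → Spec_match_api_contracts_by_topic title all_endpoints (match_api_contracts_by_topic title all_endpoints)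

-- ===== LEMMAS AND PROOFS =====

-- B's break-at-5 scan is 'append the filtered suffix, capped at 5'.
theorem pvCollect_eq (active : List String) (l out : List String) (h : out.length < 5) :
    pvCollect active l out =
      (out ++ l.filter (fun ep => active.any (fun sub => PySem.Str.isIn sub ep))).take 5 := by
  induction l generalizing out with
  | nil => simp [pvCollect, List.take_of_length_le (Nat.le_of_lt h)]
  | cons ep rest ih =>
    simp only [pvCollect, List.filter_cons]
    by_cases hp : active.any (fun sub => PySem.Str.isIn sub ep) = true
    · simp only [hp, if_true]
      by_cases h5 : (out ++ [ep]).length = 5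
      · have : (out ++ [ep] ++ rest.filter (fun ep => active.any (fun sub => PySem.Str.isIn sub ep))).take 5 = out ++ [ep] := by
          rw [← h5]; exact List.take_left
        simpa [h5] using this.symm
      · have hlt : (out ++ [ep]).length < 5 := by
          simp only [List.length_append, List.length_cons, List.length_nil] at h5 ⊢; omega
        simp only [beq_iff_eq, h5, if_false, ih _ hlt, List.append_assoc, List.singleton_append]
    · simp only [hp, if_false, Bool.false_eq_true, ih _ h]

-- A's nested append loops collect the per-topic filtered endpoint lists, flattened.
theorem matchedA_eq {α β : Type} (p : α → Bool) (q : α → β → Bool) (l : List α) (eps : List β) :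
    l.foldl (fun m ts =>
      if p ts then eps.foldl (fun m ep => if q ts ep then m ++ [ep] else m) m else m) [] =
    l.flatMap (fun ts => if p ts then eps.filter (q ts) else []) := by
  have h : l.foldl (fun m ts =>
      if p ts then eps.foldl (fun m ep => if q ts ep then m ++ [ep] else m) m else m) [] =
    l.foldl (fun m ts => m ++ (if p ts then eps.filter (q ts) else [])) [] := by
    apply PySem.List.foldl_congr_mem
    intro acc ts _
    by_cases hc : p ts
    · simp [hc, PySem.List.foldl_append_if_eq_filter]
    · simp [hc]
  rw [h]
  simpa using PySem.List.foldl_append_eq_flatMap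
    (fun ts => if p ts then eps.filter (q ts) else []) ([] : List β) (l := l)

-- Membership in A's match list = membership in the endpoints + some active substring matches.
theorem mem_matched_iff {α β : Type} (p : α → Bool) (q : α → β → Bool) (l : List α)
    (eps : List β) (x : β) :
    (x ∈ l.flatMap (fun ts => if p ts then eps.filter (q ts) else [])) ↔
    (x ∈ eps ∧ (l.filter p).any (fun ts => q ts x) = true) := by
  simp only [List.mem_flatMap, List.any_eq_true, List.mem_filter]
  constructor
  · rintro ⟨ts, hts, hx⟩
    by_cases hc : p ts
    · simp only [hc, if_true, List.mem_filter] at hx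
      exact ⟨hx.1, ts, ⟨hts, hc⟩, hx.2⟩
    · simp [hc] at hx
  · rintro ⟨hxe, ts, hts, hq⟩
    exact ⟨ts, hts.1, by simp [hts.2, List.mem_filter, hxe, hq]⟩

-- sorted(set(matched)) is exactly the filter of sorted(set(all_endpoints)).
theorem sorted_matched_eq (active_pred : String → Bool) (matched eps : List String)
    (hm : ∀ x, x ∈ matched ↔ (x ∈ eps ∧ active_pred x = true)) :
    PySem.List.sorted (PySem.Set.ofList matched) (fun x => x) false =
      (PySem.List.sorted (PySem.Set.ofList eps) (fun x => x) false).filter active_pred := by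
  apply PySem.List.sorted_eq_of_perm_of_pairwise_lt
  · -- the filtered sorted endpoint list is a permutation of Set.ofList matched
    rw [List.perm_ext_iff_of_nodup
      (List.Nodup.filter _ (((PySem.List.sorted_perm _ _ _).nodup_iff).mpr (PySem.Set.nodup_ofList _)))
      (PySem.Set.nodup_ofList _)]
    intro x
    rw [List.mem_filter, PySem.Set.mem_ofList, (PySem.List.sorted_perm _ _ _).mem_iff,
      PySem.Set.mem_ofList, hm]
  · exact (PySem.List.sorted_ofList_pairwise_lt (xs := eps)).filter _

-- ===== VERDICT =====
set_option maxHeartbeats 1000000 in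
theorem match_api_contracts_by_topic_spec : Claim_equal_match_api_contracts_by_topic := by
  intro title eps _
  unfold Spec_match_api_contracts_by_topic match_api_contracts_by_topic match_api_contracts_by_topic_alt
  dsimp only
  rw [matchedA_eq (fun ts => PySem.Str.isIn ts.1 (PySem.Str.lower title))
        (fun ts ep => PySem.Str.isIn ts.2 ep) pvTopicsTable eps,
      pvCollect_eq _ _ [] (by decide), List.nil_append]
  rw [sorted_matched_eq (fun ep =>
        ((pvTopicsTable.filter (fun ts => PySem.Str.isIn ts.1 (PySem.Str.lower title))).map Prod.snd).any
          (fun sub => PySem.Str.isIn sub ep))]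
  intro x
  rw [mem_matched_iff]
  simp [List.any_map]
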